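-- pv_equiv track=rewrite | github.com/crab-apple/aoc2025 | src/aoc2025/solvers/day07/problem1.py | _do_splits
-- ===== SOURCE A (Python) =====
-- def _do_splits(beams, splitter_row):
--     num_splits = 0
--     beams_after = set()
--     for beam in beams:
--         if beam in splitter_row:
--             num_splits += 1
--             beams_after.add(beam - 1)
--             beams_after.add(beam + 1)
--         else:
--             beams_after.add(beam)
--
--     return beams_after, num_splits
-- ===== SOURCE B (Python) =====
-- def _do_splits(beams, splitter_row):
--     counts = {}
--     for b in beams:
--         counts[b] = counts.get(b, 0) + 1
--     splitters = set(splitter_row)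
--     num_splits = sum(c for b, c in counts.items() if b in splitters)
--     beams_after = {x for b in counts for x in ((b - 1, b + 1) if b in splitters else (b,))}
--     return beams_after, num_splits
-- ===== Notes on version B (the rewrite author's own statement) =====
-- stated objective: alternative
-- what changed: B builds a multiplicity dict of beams once, computes num_splits as a sum of the multiplicities of distinct splitter-hit beams (splitters held in a set), and expands each distinct beam exactly once into the result set, instead of A's per-element loop that tests each beam against the splitter list and accumulates into a set.
import Mathlib
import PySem

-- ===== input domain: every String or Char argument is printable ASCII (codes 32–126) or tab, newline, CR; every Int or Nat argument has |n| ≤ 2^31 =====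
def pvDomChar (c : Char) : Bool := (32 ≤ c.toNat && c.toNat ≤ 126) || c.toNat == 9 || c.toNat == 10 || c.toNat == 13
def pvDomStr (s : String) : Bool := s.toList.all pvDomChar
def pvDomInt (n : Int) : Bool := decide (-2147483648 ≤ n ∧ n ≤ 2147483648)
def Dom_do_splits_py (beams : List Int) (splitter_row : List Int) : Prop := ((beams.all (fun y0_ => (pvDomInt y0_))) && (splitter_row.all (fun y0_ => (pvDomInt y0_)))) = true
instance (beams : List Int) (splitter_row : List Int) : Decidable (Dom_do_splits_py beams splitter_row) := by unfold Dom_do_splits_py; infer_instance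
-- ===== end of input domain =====

-- B builds a multiplicity dict of beams once, gets num_splits as a sum of multiplicities of
-- the distinct splitter-hit beams, and expands each DISTINCT beam only once for the result
-- set (objective: alternative — a histogram-based restructuring of A's per-element loop).


-- ===== PORT A =====
def do_splits_py (beams : List Int) (splitter_row : List Int) : List Int × Int :=
  let st := beams.foldl (fun (acc : List Int × Int) beam =>
    if splitter_row.contains beam then
      (PySem.Set.add (PySem.Set.add acc.1 (beam - 1)) (beam + 1), acc.2 + 1)
    else
      (PySem.Set.add acc.1 beam, acc.2)) (PySem.Set.empty, 0)
  (st.1, st.2)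

-- ===== PORT B =====
def do_splits_py_alt (beams : List Int) (splitter_row : List Int) : List Int × Int :=
  let counts : PySem.Dict Int Int :=
    beams.foldl (fun d b => d.insert b (d.getD b 0 + 1)) PySem.Dict.empty
  let splitters : PySem.Set Int := PySem.Set.ofList splitter_row
  let num_splits : Int :=
    ((counts.items.filter (fun p => PySem.Set.contains splitters p.1)).map Prod.snd).sum
  let beams_after : PySem.Set Int :=
    PySem.Set.ofList (counts.keys.flatMap (fun b =>
      if PySem.Set.contains splitters b then [b - 1, b + 1] else [b]))
  (beams_after, num_splits)

-- ===== PRECONDITION & SPEC =====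
def Spec_do_splits_py (beams : List Int) (splitter_row : List Int) (out : List Int × Int) : Prop := out = do_splits_py_alt beams splitter_row
instance (beams : List Int) (splitter_row : List Int) (out : List Int × Int) : Decidable (Spec_do_splits_py beams splitter_row out) := by unfold Spec_do_splits_py; infer_instance

-- ===== CLAIM (what is proved, stated in full; the proofs are below) =====
def Claim_equal_do_splits_py : Prop := ∀ (beams : List Int) (splitter_row : List Int), Dom_do_splits_py beams splitter_row → Spec_do_splits_py beams splitter_row (do_splits_py beams splitter_row)

-- ===== LEMMAS AND PROOFS =====

-- membership in a PySem.Set of splitter_row = membership in splitter_row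
lemma pv_contains_ofList (xs : List Int) (b : Int) :
    PySem.Set.contains (PySem.Set.ofList xs) b = xs.contains b := by
  simp [PySem.Set.contains, PySem.Set.mem_ofList]

-- A's forward loop computes (set of the expanded stream, number of splitter hits).
lemma pv_A_fold (splitter_row : List Int) (beams : List Int) (s : List Int) (n : Int) :
    beams.foldl (fun (acc : List Int × Int) beam =>
        if splitter_row.contains beam then
          (PySem.Set.add (PySem.Set.add acc.1 (beam - 1)) (beam + 1), acc.2 + 1)
        else
          (PySem.Set.add acc.1 beam, acc.2)) (s, n)
      = ((beams.flatMap (fun b =>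
            if splitter_row.contains b then [b - 1, b + 1] else [b])).foldl PySem.Set.add s,
         n + (beams.countP (fun b => splitter_row.contains b) : Int)) := by
  induction beams generalizing s n with
  | nil => simp
  | cons b rest ih =>
    by_cases h2 : splitter_row.contains b
    · simp only [List.foldl_cons, List.flatMap_cons, List.countP_cons, List.foldl_append, h2]
      rw [ih]
      exact Prod.ext rfl (by push_cast; ring)
    · simp only [List.foldl_cons, List.flatMap_cons, List.countP_cons, List.foldl_append,
        if_neg h2]
      rw [ih]
      simp [List.foldl]

-- update by already-present elements is a no-op
lemma pv_update_idem (s l : List Int) (h : ∀ y ∈ l, y ∈ s) : PySem.Set.update s l = s := by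
  rw [PySem.Set.update_eq_append_filter]
  have : (PySem.Set.ofList l).filter (fun y => !(PySem.Set.contains s y)) = [] := by
    rw [List.filter_eq_nil_iff]
    intro y hy
    have : y ∈ s := h y ((PySem.Set.mem_ofList l y).mp hy)
    simp [PySem.Set.contains, this]
  rw [this, List.append_nil]

-- dropping one occurrence of b whose expansion is already in s leaves the update unchanged
lemma pv_update_skip (f : Int → List Int) (u v s : List Int) (b : Int)
    (h : ∀ y ∈ f b, y ∈ s) :
    PySem.Set.update s ((u ++ b :: v).flatMap f) = PySem.Set.update s ((u ++ v).flatMap f) := by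
  rw [List.flatMap_append, List.flatMap_cons, List.flatMap_append,
    PySem.Set.update_append, PySem.Set.update_append, PySem.Set.update_append]
  congr 1
  exact pv_update_idem _ _ (fun y hy => (PySem.Set.mem_update s _ y).mpr (Or.inl (h y hy)))

-- expanding the deduplicated list gives the same set, in the same order
lemma pv_flatMap_dedup (f : Int → List Int) (xs : List Int) :
    ∀ s : List Int, PySem.Set.update s (xs.flatMap f)
      = PySem.Set.update s ((PySem.Set.ofList xs).flatMap f) := by
  induction xs with
  | nil => intro s; rfl
  | cons x xs ih =>
    intro s
    rw [List.flatMap_cons, PySem.Set.ofList_cons, List.flatMap_cons,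
      PySem.Set.update_append, PySem.Set.update_append, ih]
    have hdis : PySem.Set.discard (PySem.Set.ofList xs) x
        = (PySem.Set.ofList xs).filter (fun y => !(y == x)) := by
      simp [PySem.Set.discard]
    by_cases hx : x ∈ PySem.Set.ofList xs
    · obtain ⟨u, v, huv⟩ := List.append_of_mem hx
      have hnd : (PySem.Set.ofList xs).Nodup := PySem.Set.nodup_ofList xs
      have hxu : x ∉ u := by
        rw [huv] at hnd
        exact fun hc => (List.disjoint_of_nodup_append hnd) hc (List.mem_cons_self)
      have hxv : x ∉ v := by
        rw [huv] at hnd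
        exact (List.nodup_cons.mp (List.Nodup.of_append_right hnd)).1
      have hfil : PySem.Set.discard (PySem.Set.ofList xs) x = u ++ v := by
        rw [hdis, huv, List.filter_append, List.filter_cons]
        simp only [beq_self_eq_true, Bool.not_true, Bool.false_eq_true, if_false]
        rw [List.filter_eq_self.mpr (fun y hy => by
              have : y ≠ x := fun h => hxu (h ▸ hy); simp [this]),
            List.filter_eq_self.mpr (fun y hy => by
              have : y ≠ x := fun h => hxv (h ▸ hy); simp [this])]
      rw [hfil, huv]
      exact pv_update_skip f u v _ x
        (fun y hy => (PySem.Set.mem_update s _ y).mpr (Or.inr hy))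
    · have : PySem.Set.discard (PySem.Set.ofList xs) x = PySem.Set.ofList xs := by
        rw [hdis, List.filter_eq_self.mpr (fun y hy => by
          have : y ≠ x := fun h => hx (h ▸ hy); simp [this])]
      rw [this]

-- the deduplicated expansion, as a set
lemma pv_ofList_flatMap_dedup (f : Int → List Int) (xs : List Int) :
    PySem.Set.ofList (xs.flatMap f)
      = PySem.Set.ofList ((PySem.Set.ofList xs).flatMap f) := by
  rw [← PySem.Set.update_nil_left, ← PySem.Set.update_nil_left]
  exact pv_flatMap_dedup f xs []

-- the histogram's weighted sum over splitter-hit keys is A's per-element hit count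
lemma pv_count_sum (q : Int → Bool) (beams : List Int) :
    ((((PySem.Set.ofList beams).map (fun k => (k, (beams.count k : Int)))).filter
        (fun p => q p.1)).map Prod.snd).sum
      = (beams.countP q : Int) := by
  rw [List.filter_map, List.map_map]
  simp only [Function.comp_def]
  have hperm : (PySem.Set.ofList beams).Perm beams.dedup :=
    (List.perm_ext_iff_of_nodup (PySem.Set.nodup_ofList beams) beams.nodup_dedup).mpr
      (fun a => by simp [PySem.Set.mem_ofList, List.mem_dedup])
  have hfil : ((PySem.Set.ofList beams).filter (fun k => q k)).Perm
      (beams.dedup.filter (fun k => q k)) := hperm.filter _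
  rw [List.Perm.sum_eq (hfil.map _)]
  rw [show (fun k => ((List.count k beams : Nat) : Int))
      = (fun n : Nat => (n : Int)) ∘ (fun k => List.count k beams) from rfl,
    ← List.map_map, ← Nat.cast_list_sum]
  rw [List.sum_map_count_dedup_filter_eq_countP]

-- ===== VERDICT (by name: the statement is the Claim_ definition above) =====
theorem do_splits_py_spec : Claim_equal_do_splits_py := by
  intro beams splitter_row _
  show _ = _
  simp only [do_splits_py, do_splits_py_alt, pv_contains_ofList]
  rw [show (PySem.Set.empty : List Int) = [] from rfl, pv_A_fold,
    ← PySem.Set.ofList_eq_foldl]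
  rw [show (beams.foldl (fun (d : PySem.Dict Int Int) b => d.insert b (d.getD b 0 + 1))
        PySem.Dict.empty) = PySem.Dict.counter beams from rfl]
  rw [PySem.Dict.keys_counter, PySem.Dict.items_counter]
  rw [pv_ofList_flatMap_dedup, pv_count_sum, zero_add]
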